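-- pv_equiv track=rewrite | github.com/EdoardoMarchetti/ScoutingAgent | possession_analyzer.py | count_ball_circulation
-- ===== SOURCE A (Python) =====
-- from typing import Dict, List, Any, Optional
--
-- def count_ball_circulation(events: List[Dict[str, Any]]) -> int:
--     """
--     Count ball circulation transitions (left to right or right to left across thirds).
--
--     Ball circulation is counted when the ball transitions from y < 33 to y > 66 or vice versa.
--     Uses state tracking to avoid double-counting.
--
--     Args:
--         events: List of events with 'location' containing 'y' coordinate
--
--     Returns:
--         Number of circulation transitions
--     """
--     circulation_count = 0
--     in_left_zone = False  # y < 33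
--     in_right_zone = False  # y > 66
--
--     for event in events:
--         location = event.get('location')
--         if not location:
--             continue
--
--         y = location.get('y', 50)  # Default to center if missing
--
--         if y < 33:
--             if in_right_zone:
--                 circulation_count += 1
--                 in_right_zone = False
--             in_left_zone = True
--         elif y > 66:
--             if in_left_zone:
--                 circulation_count += 1
--                 in_left_zone = False
--             in_right_zone = True
--
--     return circulation_count
-- ===== SOURCE B (Python) =====
-- def count_ball_circulation(events):
--     labels = []
--     for event in events:
--         location = event.get('location')
--         if not location:
--             continue
--         y = location.get('y', 50)
--         if y < 33:
--             labels.append('L')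
--         elif y > 66:
--             labels.append('R')
--     return sum(1 for a, b in zip(labels, labels[1:]) if a != b)
-- ===== Notes on version B (the rewrite author's own statement) =====
-- stated objective: simpler
-- what changed: Replaces the two-flag state machine with a filter/map pass reducing events to a list of 'L'/'R' zone labels followed by a pairwise pass counting adjacent label changes.
import Mathlib
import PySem

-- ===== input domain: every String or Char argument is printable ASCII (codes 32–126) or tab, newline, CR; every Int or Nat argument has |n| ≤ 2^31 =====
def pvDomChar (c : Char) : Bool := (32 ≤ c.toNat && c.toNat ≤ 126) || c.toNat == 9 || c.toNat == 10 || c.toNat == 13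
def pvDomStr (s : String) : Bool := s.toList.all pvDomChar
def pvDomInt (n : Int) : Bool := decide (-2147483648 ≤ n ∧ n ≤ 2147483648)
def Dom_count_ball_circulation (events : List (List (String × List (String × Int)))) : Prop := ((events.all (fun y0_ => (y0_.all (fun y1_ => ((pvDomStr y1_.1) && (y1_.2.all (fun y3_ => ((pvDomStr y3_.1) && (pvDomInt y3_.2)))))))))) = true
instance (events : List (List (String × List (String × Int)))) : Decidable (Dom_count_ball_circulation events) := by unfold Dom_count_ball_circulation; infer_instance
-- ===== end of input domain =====

-- B replaces A's two-flag state machine with a filter/map pass to zone labels plus a pairwise change count (simpler decomposition, same cost).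


-- ===== PORT A =====
-- loop body of A: state = (circulation_count, in_left_zone, in_right_zone)
def pvStepA (st : Int × Bool × Bool) (event : List (String × List (String × Int))) :
    Int × Bool × Bool :=
  match (PySem.Dict.mk event).get? "location" with
  | none => st                                   -- 'if not location: continue'
  | some location =>
    if location.isEmpty then st                  -- empty dict is falsy too
    else
      let y := (PySem.Dict.mk location).getD "y" 50
      if y < 33 then
        if st.2.2 then (st.1 + 1, true, false)   -- in_right_zone: count += 1; in_right_zone = False
        else (st.1, true, st.2.2)                -- in_left_zone = True
      else if y > 66 then
        if st.2.1 then (st.1 + 1, false, true)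
        else (st.1, st.2.1, true)
      else st

def count_ball_circulation (events : List (List (String × List (String × Int)))) : Int :=
  (events.foldl pvStepA (0, false, false)).1

-- ===== PORT B =====
-- first pass of B: reduce events to the list of 'L'/'R' zone labels
def pvLabels (events : List (List (String × List (String × Int)))) : List String :=
  events.foldl (fun labels event =>
    match (PySem.Dict.mk event).get? "location" with
    | none => labels
    | some location =>
      if location.isEmpty then labels
      else
        let y := (PySem.Dict.mk location).getD "y" 50
        if y < 33 then labels ++ ["L"]
        else if y > 66 then labels ++ ["R"]
        else labels) []

def count_ball_circulation_alt (events : List (List (String × List (String × Int)))) : Int :=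
  let labels := pvLabels events
  (labels.zip (labels.drop 1)).foldl (fun acc ab => if ab.1 ≠ ab.2 then acc + 1 else acc) 0

-- ===== PRECONDITION & SPEC =====
def Spec_count_ball_circulation (events : List (List (String × List (String × Int)))) (out : Int) : Prop := out = count_ball_circulation_alt events
instance (events : List (List (String × List (String × Int)))) (out : Int) : Decidable (Spec_count_ball_circulation events out) := by unfold Spec_count_ball_circulation; infer_instance

-- ===== CLAIM (what is proved, stated in full; the proofs are below) =====
def Claim_equal_count_ball_circulation : Prop := ∀ (events : List (List (String × List (String × Int)))), Dom_count_ball_circulation events → Spec_count_ball_circulation events (count_ball_circulation events)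

-- ===== LEMMAS AND PROOFS =====

-- the label an event contributes (none = event is dropped)
def pvLabelOf (event : List (String × List (String × Int))) : Option String :=
  match (PySem.Dict.mk event).get? "location" with
  | none => none
  | some location =>
    if location.isEmpty then none
    else
      let y := (PySem.Dict.mk location).getD "y" 50
      if y < 33 then some "L" else if y > 66 then some "R" else none

-- A's step expressed on the label of the event
def pvApply (st : Int × Bool × Bool) : Option String → Int × Bool × Bool
  | none => st
  | some l =>
    if l = "L" then
      if st.2.2 then (st.1 + 1, true, false) else (st.1, true, st.2.2)
    else
      if st.2.1 then (st.1 + 1, false, true) else (st.1, st.2.1, true)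

-- number of adjacent label changes
def pvTrans : List String → Int
  | a :: b :: t => (if a ≠ b then 1 else 0) + pvTrans (b :: t)
  | _ => 0

theorem pvLabelOf_cases (e : List (String × List (String × Int))) (l : String)
    (h : pvLabelOf e = some l) : l = "L" ∨ l = "R" := by
  unfold pvLabelOf at h
  rcases hg : (PySem.Dict.mk e).get? "location" with _ | location <;> rw [hg] at h
  · simp at h
  · by_cases he : location.isEmpty
    · simp [he] at h
    · simp only [he] at h
      split_ifs at h <;> simp_all

theorem pvStepA_eq (st : Int × Bool × Bool) (e : List (String × List (String × Int))) :
    pvStepA st e = pvApply st (pvLabelOf e) := by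
  unfold pvStepA pvLabelOf pvApply
  cases (PySem.Dict.mk e).get? "location" with
  | none => rfl
  | some location =>
    by_cases he : location.isEmpty <;> simp only [he, if_true]
    split_ifs <;> simp_all

theorem pvStepB_eq (labels : List String) (e : List (String × List (String × Int))) :
    (match (PySem.Dict.mk e).get? "location" with
      | none => labels
      | some location =>
        if location.isEmpty then labels
        else
          let y := (PySem.Dict.mk location).getD "y" 50
          if y < 33 then labels ++ ["L"]
          else if y > 66 then labels ++ ["R"]
          else labels) = labels ++ (pvLabelOf e).toList := by
  unfold pvLabelOf
  cases (PySem.Dict.mk e).get? "location" with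
  | none => simp
  | some location =>
    by_cases he : location.isEmpty <;> simp only [he, if_true]
    · simp
    · split_ifs <;> simp

theorem pvLabels_eq (events : List (List (String × List (String × Int)))) :
    pvLabels events = events.filterMap pvLabelOf := by
  suffices h : ∀ acc, events.foldl (fun labels event =>
      match (PySem.Dict.mk event).get? "location" with
      | none => labels
      | some location =>
        if location.isEmpty then labels
        else
          let y := (PySem.Dict.mk location).getD "y" 50
          if y < 33 then labels ++ ["L"]
          else if y > 66 then labels ++ ["R"]
          else labels) acc = acc ++ events.filterMap pvLabelOf by
    unfold pvLabels
    rw [h []]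
    simp
  induction events with
  | nil => intro acc; simp
  | cons e t ih =>
    intro acc
    rw [List.foldl_cons, pvStepB_eq acc e, ih, List.filterMap_cons]
    cases pvLabelOf e <;> simp

theorem pvZipFold_eq (xs : List String) (c : Int) :
    (xs.zip (xs.drop 1)).foldl (fun acc ab => if ab.1 ≠ ab.2 then acc + 1 else acc) c
      = c + pvTrans xs := by
  induction xs generalizing c with
  | nil => simp [pvTrans]
  | cons a t ih =>
    cases t with
    | nil => simp [pvTrans]
    | cons b t' =>
      simp only [List.drop_one, List.tail_cons] at ih ⊢
      rw [List.zip_cons_cons, List.foldl_cons, ih]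
      simp only [pvTrans]
      split_ifs <;> ring

theorem pvA_aux (events : List (List (String × List (String × Int)))) : ∀ (c : Int),
    (events.foldl pvStepA (c, false, false)).1 = c + pvTrans (events.filterMap pvLabelOf)
  ∧ (events.foldl pvStepA (c, true, false)).1 = c + pvTrans ("L" :: events.filterMap pvLabelOf)
  ∧ (events.foldl pvStepA (c, false, true)).1 = c + pvTrans ("R" :: events.filterMap pvLabelOf) := by
  induction events with
  | nil => intro c; simp [pvTrans]
  | cons e t ih =>
    intro c
    simp only [List.foldl_cons, List.filterMap_cons, pvStepA_eq]
    cases hl : pvLabelOf e with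
    | none => simpa [pvApply] using ih c
    | some l =>
      rcases pvLabelOf_cases e l hl with rfl | rfl
      · refine ⟨?_, ?_, ?_⟩
        · simpa [pvApply, pvTrans] using (ih c).2.1
        · simpa [pvApply, pvTrans] using (ih c).2.1
        · have := (ih (c + 1)).2.1
          simp only [pvApply, pvTrans] at *
          simp [this]; ring
      · refine ⟨?_, ?_, ?_⟩
        · simpa [pvApply, pvTrans] using (ih c).2.2
        · have := (ih (c + 1)).2.2
          simp only [pvApply, pvTrans] at *
          simp [this]; ring
        · simpa [pvApply, pvTrans] using (ih c).2.2

-- ===== VERDICT (by name: the statement is the Claim_ definition above) =====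
theorem count_ball_circulation_spec : Claim_equal_count_ball_circulation := by
  intro events _
  unfold Spec_count_ball_circulation count_ball_circulation count_ball_circulation_alt
  rw [pvLabels_eq, pvZipFold_eq]
  simpa using (pvA_aux events 0).1
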